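-- pv_equiv track=rewrite | github.com/gggrucha/pp1 | 12-Test3/mock1/p7.py | f
-- ===== SOURCE A (Python) =====
-- def f(arr2D):
--
--     # szukanie największego elementu w arr2D
--     maxi = len(max(arr2D,key=len)) # największy element
--     for lista in arr2D:
--         while len(lista)<maxi: # wykona się jeśli jakaś lista ma mniej elementow niz najwieksza z pozostalych
--             lista.append(0)
--
--     # szukanie dwóch takich samych sum
--     sumy = []
--     for i in range (len(arr2D[0])):
--         sumka = 0
--         for j in range(len(arr2D)):
--             sumka += arr2D[j][i]  # suma jednej wewnętrznej listy
--         if sumka in sumy: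
--             return True
--         sumy.append(sumka)
--     return False
-- ===== SOURCE B (Python) =====
-- def f(arr2D):
--     # same padding phase as the original (mutates the argument the same way)
--     maxi = len(max(arr2D, key=len))
--     for lista in arr2D:
--         lista.extend([0] * (maxi - len(lista)))
--     # pass 1: build the full table of column sums row by row
--     sums = [0] * maxi
--     for row in arr2D:
--         for i, v in enumerate(row):
--             sums[i] += v
--     # pass 2: scan the table for a repeated total
--     seen = set()
--     for s in sums:
--         if s in seen:
--             return True
--         seen.add(s)
--     return False
-- ===== Notes on version B (the rewrite author's own statement) =====
-- stated objective: alternative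
-- what changed: Instead of summing column-by-column (inner loop over rows per column) with an interleaved list-membership check and early return, B accumulates all column sums in one row-wise pass over the padded matrix and then scans the finished table with a hash set for a duplicate.
import Mathlib
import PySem

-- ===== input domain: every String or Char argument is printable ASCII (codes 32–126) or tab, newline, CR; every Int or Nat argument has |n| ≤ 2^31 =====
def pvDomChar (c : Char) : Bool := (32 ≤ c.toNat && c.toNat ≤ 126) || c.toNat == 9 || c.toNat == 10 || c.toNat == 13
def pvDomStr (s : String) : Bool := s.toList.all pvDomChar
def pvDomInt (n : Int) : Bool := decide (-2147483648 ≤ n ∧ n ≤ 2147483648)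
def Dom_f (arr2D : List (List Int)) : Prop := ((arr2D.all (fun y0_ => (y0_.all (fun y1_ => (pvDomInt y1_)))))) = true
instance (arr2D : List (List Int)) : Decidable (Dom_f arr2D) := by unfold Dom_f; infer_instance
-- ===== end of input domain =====

-- B builds the full table of column sums in one row-wise pass, then scans it with a set for a
-- repeated total, instead of A's column-by-column summing with an interleaved list-membership check.
-- Both programs pad the argument's rows in place in Python; the equivalence proved is about the return value
-- (the mutation is identical in A and B).

-- ===== PORT A =====
-- inner loop: sumka = 0; for j in range(len(P)): sumka += P[j][i]
def fSumka (P : List (List Int)) (i : Int) : Int :=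
  (PySem.List.pyRange 0 (P.length : Int) 1).foldl
    (fun sumka j => sumka + PySem.List.pyGetD (PySem.List.pyGetD P j []) i 0) 0

-- outer loop with early return: for i in …: … if sumka in sumy: return True; sumy.append(sumka)
def fLoopA (P : List (List Int)) : List Int → List Int → Bool
  | [], _ => false
  | i :: is, sumy =>
    let sumka := fSumka P i
    if sumy.contains sumka then true else fLoopA P is (sumy ++ [sumka])

def f (arr2D : List (List Int)) : Bool :=
  match PySem.List.max? arr2D (fun l => (l.length : Int)) with
  | none => false   -- max([]) raises ValueError: excluded by Pre_f
  | some m =>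
    let maxi := m.length
    -- while len(lista) < maxi: lista.append(0)
    let padded := arr2D.map (fun lista => lista ++ List.replicate (maxi - lista.length) 0)
    fLoopA padded (PySem.List.pyRange 0 ((padded.headD []).length : Int) 1) []

-- ===== PORT B =====
-- for i, v in enumerate(row): sums[i] += v
def fInner (sums row : List Int) : List Int :=
  (PySem.List.enumerate row).foldl
    (fun s iv => PySem.List.pySetD s iv.1 (PySem.List.pyGetD s iv.1 0 + iv.2)) sums

-- sums = [0]*maxi; for row in arr2D: …
def fSums (P : List (List Int)) (maxi : Nat) : List Int :=
  P.foldl fInner (List.replicate maxi 0)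

-- seen = set(); for s in sums: if s in seen: return True; seen.add(s)
def fScan : List Int → PySem.Set Int → Bool
  | [], _ => false
  | s :: rest, seen => if seen.contains s then true else fScan rest (PySem.Set.add seen s)

def f_alt (arr2D : List (List Int)) : Bool :=
  match PySem.List.max? arr2D (fun l => (l.length : Int)) with
  | none => false   -- max([]) raises ValueError: excluded by Pre_f
  | some m =>
    let maxi := m.length
    let padded := arr2D.map (fun lista => lista ++ List.replicate (maxi - lista.length) 0)
    fScan (fSums padded maxi) PySem.Set.empty

-- ===== PRECONDITION & SPEC =====
-- Pre_f excludes only the empty outer list, on which both A and B raise ValueError (max of an empty sequence).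
def Pre_f (arr2D : List (List Int)) : Prop := arr2D ≠ []
instance (arr2D : List (List Int)) : Decidable (Pre_f arr2D) := by unfold Pre_f; infer_instance
def pvWitness_f : List (List Int) := [[1, 2], [3]]

def Spec_f (arr2D : List (List Int)) (out : Bool) : Prop := out = f_alt arr2D
instance (arr2D : List (List Int)) (out : Bool) : Decidable (Spec_f arr2D out) := by unfold Spec_f; infer_instance

-- ===== CLAIM (what is proved, stated in full; the proofs are below) =====
def Claim_equal_f : Prop := ∀ (arr2D : List (List Int)), Dom_f arr2D → Pre_f arr2D → Spec_f arr2D (f arr2D)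

-- ===== LEMMAS AND PROOFS =====

-- column sum of P at column k
def colSum (P : List (List Int)) (k : Nat) : Int :=
  P.foldl (fun a row => a + row.getD k 0) 0

theorem fSumka_natCast (P : List (List Int)) (k : Nat) :
    fSumka P (k : Int) = colSum P k := by
  unfold fSumka colSum
  rw [PySem.List.foldl_pyRange_zero_pyGetD' P ([] : List Int)
        (fun acc row => acc + PySem.List.pyGetD row (k : Int) 0) 0]
  simp

theorem fInner_aux (row : List Int) : ∀ (pre s : List Int), row.length = s.length →
    (PySem.List.enumerate row (pre.length : Int)).foldl
      (fun s iv => PySem.List.pySetD s iv.1 (PySem.List.pyGetD s iv.1 0 + iv.2)) (pre ++ s)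
    = pre ++ List.zipWith (· + ·) s row := by
  induction row with
  | nil =>
    intro pre s h
    cases s with
    | nil => simp [PySem.List.enumerate]
    | cons y ys => simp at h
  | cons x xs ih =>
    intro pre s h
    cases s with
    | nil => simp at h
    | cons y ys =>
      simp only [PySem.List.enumerate_cons, List.foldl_cons]
      have hget : PySem.List.pyGetD (pre ++ y :: ys) (pre.length : Int) 0 = y := by
        simp [PySem.List.pyGetD_natCast, List.getD_eq_getElem?_getD]
      have hset : PySem.List.pySetD (pre ++ y :: ys) (pre.length : Int) (y + x)
          = (pre ++ [y + x]) ++ ys := by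
        simp [PySem.List.pySetD_natCast]
      rw [hget, hset]
      have hlen : ((pre.length : Int) + 1) = (((pre ++ [y + x]).length : Nat) : Int) := by
        simp
      rw [hlen, ih (pre ++ [y + x]) ys (by simpa using h)]
      simp

theorem fInner_eq (s row : List Int) (h : row.length = s.length) :
    fInner s row = List.zipWith (· + ·) s row := by
  have := fInner_aux row [] s h
  simpa [fInner] using this

theorem colSum_append (Q : List (List Int)) (row : List Int) (k : Nat) :
    colSum (Q ++ [row]) k = colSum Q k + row.getD k 0 := by
  simp [colSum, List.foldl_append]

theorem fSums_eq (P : List (List Int)) (maxi : Nat) (h : ∀ r ∈ P, r.length = maxi) :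
    fSums P maxi = (List.range maxi).map (fun k => colSum P k) := by
  induction P using List.reverseRecOn with
  | nil =>
    simp [fSums, colSum, List.map_const']
  | append_singleton Q row ih =>
    have hQ : ∀ r ∈ Q, r.length = maxi := fun r hr => h r (by simp [hr])
    have hrow : row.length = maxi := h row (by simp)
    have hfold : fSums (Q ++ [row]) maxi = fInner (fSums Q maxi) row := by
      simp [fSums, List.foldl_append]
    rw [hfold, ih hQ, fInner_eq _ _ (by simp [hrow])]
    have hrow' : row = (List.range maxi).map (fun k => row.getD k 0) := by
      apply List.ext_getElem (by simp [hrow])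
      intro k h1 h2
      simp at h2
      simp [List.getD_eq_getElem?_getD, List.getElem?_eq_getElem (by omega : k < row.length)]
    calc List.zipWith (· + ·) ((List.range maxi).map (fun k => colSum Q k)) row
        = List.zipWith (· + ·) ((List.range maxi).map (fun k => colSum Q k))
            ((List.range maxi).map (fun k => row.getD k 0)) := by rw [← hrow']
      _ = List.zipWith (fun a b => colSum Q a + row.getD b 0) (List.range maxi) (List.range maxi) := by
            rw [List.zipWith_map]
      _ = (List.range maxi).map (fun k => colSum (Q ++ [row]) k) := by
            rw [List.zipWith_self]
            exact List.map_congr_left (fun k _ => (colSum_append Q row k).symm)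

theorem scan_eq (P : List (List Int)) (is : List Int) :
    ∀ (sumy : List Int) (seen : PySem.Set Int),
    (∀ x : Int, x ∈ sumy ↔ x ∈ seen) →
    fLoopA P is sumy = fScan (is.map (fSumka P)) seen := by
  induction is with
  | nil => intro sumy seen _; simp [fLoopA, fScan]
  | cons i is ih =>
    intro sumy seen hmem
    simp only [List.map_cons, fLoopA, fScan]
    have hc : sumy.contains (fSumka P i) = seen.contains (fSumka P i) := by
      simp only [PySem.Set.contains_eq_listContains]
      by_cases hx : fSumka P i ∈ sumy
      · simp [hx, (hmem _).1 hx]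
      · have : fSumka P i ∉ seen := fun h => hx ((hmem _).2 h)
        simp [hx, this]
    rw [hc]
    by_cases hb : seen.contains (fSumka P i) = true
    · rw [if_pos hb, if_pos hb]
    · rw [if_neg hb, if_neg hb]
      apply ih
      intro x
      rw [PySem.Set.mem_add]
      constructor
      · intro hx
        rcases List.mem_append.mp hx with h1 | h1
        · exact Or.inl ((hmem x).1 h1)
        · exact Or.inr (by simpa using h1)
      · intro hx
        rcases hx with h1 | h1
        · exact List.mem_append.mpr (Or.inl ((hmem x).2 h1))
        · exact List.mem_append.mpr (Or.inr (by simp [h1]))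

theorem pyRange_zero_nat_map (n : Nat) :
    PySem.List.pyRange 0 (n : Int) 1 = List.map (Nat.cast : Nat → Int) (List.range n) := by
  rw [PySem.List.pyRange_one]
  norm_num

-- ===== VERDICT (by name: the statement is the Claim_ definition above) =====
theorem f_spec : Claim_equal_f := by
  intro arr2D _ hpre
  unfold Spec_f f f_alt
  obtain ⟨m, hm⟩ : ∃ m, PySem.List.max? arr2D (fun l => (l.length : Int)) = some m := by
    cases hmax : PySem.List.max? arr2D (fun l => (l.length : Int)) with
    | none => exact absurd ((PySem.List.max?_eq_none_iff _ _).mp hmax) hpre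
    | some m => exact ⟨m, rfl⟩
  rw [hm]
  set maxi := m.length with hmaxi
  set P := arr2D.map (fun lista => lista ++ List.replicate (maxi - lista.length) 0) with hP
  have hle : ∀ r ∈ arr2D, r.length ≤ maxi := by
    intro r hr
    have := PySem.List.max?_isMax hm r hr
    exact_mod_cast this
  have hrows : ∀ r ∈ P, r.length = maxi := by
    intro r hr
    rw [hP] at hr
    rcases List.mem_map.mp hr with ⟨l, hl, rfl⟩
    have := hle l hl
    simp; omega
  have hhead : (P.headD []).length = maxi := by
    cases harr : arr2D with
    | nil => exact absurd harr hpre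
    | cons a rest =>
      apply hrows
      rw [hP, harr]
      simp
  show fLoopA P (PySem.List.pyRange 0 ((P.headD []).length : Int) 1) []
      = fScan (fSums P maxi) PySem.Set.empty
  rw [hhead, fSums_eq P maxi hrows, scan_eq P _ [] PySem.Set.empty (by simp [PySem.Set.empty])]
  rw [pyRange_zero_nat_map, List.map_map]
  exact congrArg (fun t => fScan t PySem.Set.empty)
    (List.map_congr_left (fun k _ => fSumka_natCast P k))
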